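-- pv_equiv track=rewrite | github.com/locharp/code-snippets | Coding Ninjas/Coding World Cup 2023/Easy/Day 27 : Magician and Chocolates.py | maximumChocolates
-- ===== SOURCE A (Python) =====
-- from bisect import bisect_right
--
-- def maximumChocolates(arr, k):
--     arr.sort()
--     ate = 0
--     mod = int(1E9 + 7)
--
--     for i in range(k):
--         eat = arr.pop()
--         ate = (ate + eat) % mod
--         refill = eat // 2
--         arr.insert(bisect_right(arr, refill), refill)
--
--     return ate
-- ===== SOURCE B (Python) =====
-- def maximumChocolates(arr, k):
--     # Repeated linear selection: no sort, no bisect/insert; the bag keeps a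
--     # fixed length and each round replaces the current maximum by its half.
--     # (Unlike A, this does not mutate the caller's list.)
--     mod = 1000000007
--     bag = list(arr)
--     ate = 0
--     for _ in range(k):
--         m = max(bag)
--         ate = (ate + m) % mod
--         bag[bag.index(m)] = m // 2
--     return ate
-- ===== Notes on version B (the rewrite author's own statement) =====
-- stated objective: alternative
-- what changed: A keeps a sorted list (initial sort, pop from the end, bisect_right re-insertion each round); B keeps an unsorted fixed-length bag and each round scans for the maximum and overwrites its first occurrence with its half.
import Mathlib
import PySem

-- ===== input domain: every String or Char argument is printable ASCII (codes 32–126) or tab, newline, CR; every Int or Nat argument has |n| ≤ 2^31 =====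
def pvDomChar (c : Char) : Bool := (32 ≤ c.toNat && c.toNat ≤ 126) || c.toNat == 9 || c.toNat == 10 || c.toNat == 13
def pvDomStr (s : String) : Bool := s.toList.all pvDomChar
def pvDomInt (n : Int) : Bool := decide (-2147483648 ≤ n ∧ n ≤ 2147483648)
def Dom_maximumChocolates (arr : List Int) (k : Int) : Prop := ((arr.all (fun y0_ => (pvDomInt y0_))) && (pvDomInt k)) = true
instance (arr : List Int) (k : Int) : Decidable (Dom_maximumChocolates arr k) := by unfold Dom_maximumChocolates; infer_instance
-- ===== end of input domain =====

-- B replaces A's sorted-list maintenance (sort, pop last, bisect_right re-insert) by repeated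
-- linear selection over an unsorted fixed-length bag (scan for max, overwrite it with its half);
-- same cost class, genuinely different structure. A mutates its argument list in place, B does
-- not; the equivalence proved here is about the RETURN value only.


-- ===== PORT A =====
-- for i in range(k): eat = arr.pop(); ate = (ate+eat) % mod; arr.insert(bisect_right(arr, eat//2), eat//2)
def mcLoopA : Nat → List Int → Int → Int
  | 0, _, ate => ate
  | n + 1, arr, ate =>
    match PySem.List.pop? arr with
    | none => ate        -- Python raises IndexError here; excluded by Pre_
    | some (eat, rest) =>
      let ate' := PySem.Int.mod (ate + eat) 1000000007
      let refill := PySem.Int.floordiv eat 2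
      mcLoopA n (PySem.List.insert rest ((PySem.List.bisectRight rest refill : Nat) : Int) refill) ate'

def maximumChocolates (arr : List Int) (k : Int) : Int :=
  mcLoopA k.toNat (PySem.List.sorted arr (fun x => x)) 0

-- ===== PORT B =====
-- bag[bag.index(m)] = m // 2 : overwrite the first occurrence of m
def mcReplaceFirst : List Int → Int → Int → List Int
  | [], _, _ => []
  | h :: t, m, r => if h = m then r :: t else h :: mcReplaceFirst t m r

-- for _ in range(k): m = max(bag); ate = (ate+m) % mod; bag[bag.index(m)] = m//2
def mcLoopB : Nat → List Int → Int → Int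
  | 0, _, ate => ate
  | n + 1, bag, ate =>
    match PySem.List.max? bag (fun x => x) with
    | none => ate        -- Python raises ValueError here; excluded by Pre_
    | some m =>
      mcLoopB n (mcReplaceFirst bag m (PySem.Int.floordiv m 2)) (PySem.Int.mod (ate + m) 1000000007)

def maximumChocolates_alt (arr : List Int) (k : Int) : Int :=
  mcLoopB k.toNat arr 0

-- ===== PRECONDITION & SPEC =====
-- On arr = [] with k > 0 the Python A raises IndexError (pop from empty list); excluded.
def Pre_maximumChocolates (arr : List Int) (k : Int) : Prop := arr ≠ [] ∨ k ≤ 0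
instance (arr : List Int) (k : Int) : Decidable (Pre_maximumChocolates arr k) := by
  unfold Pre_maximumChocolates; infer_instance
def pvWitness_maximumChocolates : List Int × Int := ([5, 3, 8], 4)

def Spec_maximumChocolates (arr : List Int) (k : Int) (out : Int) : Prop := out = maximumChocolates_alt arr k
instance (arr : List Int) (k : Int) (out : Int) : Decidable (Spec_maximumChocolates arr k out) := by unfold Spec_maximumChocolates; infer_instance

-- ===== CLAIM (what is proved, stated in full; the proofs are below) =====
def Claim_equal_maximumChocolates : Prop := ∀ (arr : List Int) (k : Int), Dom_maximumChocolates arr k → Pre_maximumChocolates arr k → Spec_maximumChocolates arr k (maximumChocolates arr k)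

-- ===== LEMMAS AND PROOFS =====

-- Inserting x at position bisectRight l x keeps a ≤-sorted list sorted.
theorem insert_bisect_pairwise (l : List Int) (x : Int) (h : l.Pairwise (· ≤ ·)) :
    (l.take (PySem.List.bisectRight l x) ++ x :: l.drop (PySem.List.bisectRight l x)).Pairwise (· ≤ ·) := by
  obtain ⟨hle, hlt, hgt⟩ := PySem.List.bisectRight_spec l x h
  set p := PySem.List.bisectRight l x with hp
  have htake : ∀ a ∈ l.take p, a ≤ x := by
    intro a ha
    obtain ⟨j, hj, he⟩ := List.mem_iff_getElem.mp ha
    have hj' : j < p := lt_of_lt_of_le hj (by simp)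
    have hjl : j < l.length := lt_of_lt_of_le hj' hle
    have := hlt j hjl hj'
    rw [List.getElem_take] at he
    omega
  have hdrop : ∀ b ∈ l.drop p, x < b := by
    intro b hb
    obtain ⟨i, hi, he⟩ := List.mem_iff_getElem.mp hb
    have hil : p + i < l.length := by simpa [Nat.lt_sub_iff_add_lt'] using hi
    have := hgt (p + i) hil (Nat.le_add_right p i)
    rw [List.getElem_drop] at he
    omega
  refine List.pairwise_append.mpr ⟨?_, ?_, ?_⟩
  · exact List.Pairwise.sublist (List.take_sublist p l) h
  · refine List.pairwise_cons.mpr ⟨fun b hb => le_of_lt (hdrop b hb), ?_⟩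
    exact List.Pairwise.sublist (List.drop_sublist p l) h
  · intro a ha b hb
    rcases List.mem_cons.mp hb with rfl | hb'
    · exact htake a ha
    · exact le_of_lt (lt_of_le_of_lt (htake a ha) (hdrop b hb'))

-- mcReplaceFirst is, up to permutation, "remove one m, add r".
theorem mcReplaceFirst_perm (bag : List Int) (m r : Int) (hm : m ∈ bag) :
    (mcReplaceFirst bag m r).Perm (r :: bag.erase m) := by
  induction bag with
  | nil => cases hm
  | cons h t ih =>
    by_cases he : h = m
    · subst he; simp [mcReplaceFirst, List.erase_cons_head]
    · have hmt : m ∈ t := by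
        rcases List.mem_cons.mp hm with h' | h'
        · exact absurd h'.symm he
        · exact h'
      have h1 : mcReplaceFirst (h :: t) m r = h :: mcReplaceFirst t m r := by
        simp [mcReplaceFirst, he]
      have h2 : (h :: mcReplaceFirst t m r).Perm (h :: (r :: t.erase m)) :=
        List.Perm.cons h (ih hmt)
      have h3 : (h :: (r :: t.erase m)).Perm (r :: (h :: t.erase m)) :=
        List.Perm.swap r h _
      have h4 : r :: (h :: t).erase m = r :: (h :: t.erase m) := by
        rw [List.erase_cons_tail (by simpa using he)]
      rw [h1, h4]
      exact h2.trans h3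

-- Main invariant: a ≤-sorted l permutation-equal to bag gives equal loop results.
theorem loop_eq (n : Nat) : ∀ (l bag : List Int) (ate : Int),
    l.Pairwise (· ≤ ·) → l.Perm bag → mcLoopA n l ate = mcLoopB n bag ate := by
  induction n with
  | zero => intro l bag ate _ _; rfl
  | succ n ih =>
    intro l bag ate hsort hperm
    rcases List.eq_nil_or_concat l with rfl | ⟨l', eat, rfl⟩
    · have hbag : bag = [] := hperm.symm.eq_nil
      subst hbag
      simp [mcLoopA, mcLoopB, PySem.List.pop?, PySem.List.max?]
    · rw [List.concat_eq_append] at hsort hperm ⊢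
      have hpop : PySem.List.pop? (l' ++ [eat]) = some (eat, l') := PySem.List.pop?_last _ _
      have hbagne : bag ≠ [] := by
        intro hb; subst hb; exact absurd hperm.eq_nil (by simp)
      obtain ⟨m, hmax⟩ : ∃ m, PySem.List.max? bag (fun x => x) = some m := by
        cases h : PySem.List.max? bag (fun x => x) with
        | none => exact absurd ((PySem.List.max?_eq_none_iff bag _).mp h) hbagne
        | some m => exact ⟨m, rfl⟩
      have hmbag : m ∈ bag := PySem.List.max?_mem hmax
      have heat : eat = m := by
        have h1 : m ≤ eat := by
          have hml : m ∈ l' ++ [eat] := hperm.symm.subset hmbag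
          rcases List.mem_append.mp hml with h' | h'
          · exact List.pairwise_append.mp hsort |>.2.2 m h' eat (by simp)
          · simp at h'; omega
        have h2 : eat ≤ m := PySem.List.max?_isMax hmax eat (hperm.subset (by simp))
        omega
      subst heat
      have hsort' : l'.Pairwise (· ≤ ·) :=
        hsort.sublist (List.sublist_append_left l' [eat])
      have hp : PySem.List.bisectRight l' (PySem.Int.floordiv eat 2) ≤ l'.length :=
        (PySem.List.bisectRight_spec l' _ hsort').1
      have hstepA : mcLoopA (n + 1) (l' ++ [eat]) ate =
          mcLoopA n (PySem.List.insert l'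
            ((PySem.List.bisectRight l' (PySem.Int.floordiv eat 2) : Nat) : Int)
            (PySem.Int.floordiv eat 2)) (PySem.Int.mod (ate + eat) 1000000007) := by
        simp only [mcLoopA, hpop]
      have hstepB : mcLoopB (n + 1) bag ate =
          mcLoopB n (mcReplaceFirst bag eat (PySem.Int.floordiv eat 2))
            (PySem.Int.mod (ate + eat) 1000000007) := by
        simp only [mcLoopB, hmax]
      rw [hstepA, hstepB, PySem.List.insert_natCast l' _ _ hp]
      apply ih
      · exact insert_bisect_pairwise l' _ hsort'
      · -- permutation of the two next states
        set r := PySem.Int.floordiv eat 2 with hr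
        set p := PySem.List.bisectRight l' r with hpdef
        have e1 : (l'.take p ++ r :: l'.drop p).Perm (r :: l') := by
          have := List.perm_middle (a := r) (l₁ := l'.take p) (l₂ := l'.drop p)
          simpa [List.take_append_drop] using this
        have e2 : l'.Perm (bag.erase eat) := by
          have c1 : (eat :: l').Perm (l' ++ [eat]) := by
            simpa using (List.perm_middle (a := eat) (l₁ := l') (l₂ := [])).symm
          have c2 : (l' ++ [eat]).Perm bag := hperm
          have c3 : bag.Perm (eat :: bag.erase eat) := List.perm_cons_erase hmbag
          exact ((c1.trans c2).trans c3).cons_inv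
        exact e1.trans ((e2.cons r).trans (mcReplaceFirst_perm bag eat r hmbag).symm)

theorem maximumChocolates_spec : Claim_equal_maximumChocolates := by
  intro arr k _ _
  unfold Spec_maximumChocolates maximumChocolates maximumChocolates_alt
  exact loop_eq k.toNat _ arr 0 (PySem.List.sorted_pairwise arr (fun x => x))
    (PySem.List.sorted_perm arr (fun x => x) false)
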